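-- pv_equiv track=rewrite | github.com/SIDED00R/Code_training | 프로그래머스/3/77886. 110 옮기기/110 옮기기.py | solution
-- ===== SOURCE A (Python) =====
-- def solution(s):
--     answer = []
--     for case in s:
--         stack = []
--         count = 0
--         moved = []
--         for num in case:
--             if num == "1":
--                 count += 1
--             if num == "0" and count >= 2:
--                 stack.pop()
--                 stack.pop()
--                 count -= 2
--                 moved += ["1", "1", "0"]
--                 continue
--             elif num == "0":
--                 count = 0
--             stack.append(num)
--         check = 0
--         for idx in range(len(stack)):
--             if stack[idx] == "0":
--                 check = 0
--                 continue
--             else: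
--                 check += 1
--                 if check == 2:
--                     stack = stack[:idx - 1] + moved + stack[idx - 1:]
--                     break
--         if check == 0:
--             stack += moved
--         elif check == 1:
--             stack.pop()
--             stack += moved
--             stack.append("1")
--         answer.append("".join(stack))
--     return answer
-- ===== SOURCE B (Python) =====
-- def solution(s):
--     out = []
--     for case in s:
--         # phase 1: fold over the '0'-separated chunks
--         parts = case.split("0")
--         t = parts[0]
--         count = parts[0].count("1")
--         k = 0
--         for c in parts[1:]:
--             if count >= 2:
--                 t, count, k = t[:-2], count - 2, k + 1
--             else:
--                 t, count = t + "0", 0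
--             t += c
--             count += c.count("1")
--         moved = "110" * k
--         # phase 2: insert before the first chunk of length >= 2
--         ins = None
--         j = 0
--         for p in t.split("0"):
--             if len(p) >= 2:
--                 ins = j
--                 break
--             j += len(p) + 1
--         if ins is not None:
--             res = t[:ins] + moved + t[ins:]
--         elif t and t[-1] != "0":
--             res = t[:-1] + moved + "1"
--         else:
--             res = t + moved
--         out.append(res)
--     return out
-- ===== Notes on version B (the rewrite author's own statement) =====
-- stated objective: alternative
-- what changed: B never runs A's character-level stack machine: it splits each string on '0' and folds whole chunks (one t[:-2] slice and one c.count('1') per separator instead of per-character push/pop/count updates), and reinserts the removed '110' blocks by scanning the chunk list of the reduced string for the first chunk of length >= 2 instead of A's per-character 'check' state machine with three post-loop special cases.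
import Mathlib
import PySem

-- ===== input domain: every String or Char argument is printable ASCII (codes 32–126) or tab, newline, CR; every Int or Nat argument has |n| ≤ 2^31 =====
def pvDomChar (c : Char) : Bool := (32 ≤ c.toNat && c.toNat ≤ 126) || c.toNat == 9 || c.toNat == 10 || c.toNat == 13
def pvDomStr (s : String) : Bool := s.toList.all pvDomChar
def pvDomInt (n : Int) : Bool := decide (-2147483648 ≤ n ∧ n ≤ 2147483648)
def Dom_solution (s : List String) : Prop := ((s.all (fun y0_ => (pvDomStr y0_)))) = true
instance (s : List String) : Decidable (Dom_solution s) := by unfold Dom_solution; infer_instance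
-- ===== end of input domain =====

-- B replaces A's character-level stack machine by a fold over the chunks of case.split("0")
-- (one slice and one chunk count per separator) and replaces A's per-character 'check' state
-- machine plus its three special cases by a scan of the reduced string's chunk list for the
-- first chunk of length >= 2; objective: alternative (same asymptotic cost).

-- ===== PORT A =====
-- one step of A's first loop; state = (stack, count, moved).  stack.pop();stack.pop() is
-- dropLast.dropLast (exact here: count <= len(stack) holds along A's loop, so pop never raises)
def redStepA (st : List Char × Int × List Char) (num : Char) : List Char × Int × List Char :=
  let count := if num = '1' then st.2.1 + 1 else st.2.1
  if num = '0' ∧ 2 ≤ count then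
    (st.1.dropLast.dropLast, count - 2, st.2.2 ++ ['1', '1', '0'])
  else if num = '0' then
    (st.1 ++ [num], 0, st.2.2)
  else
    (st.1 ++ [num], count, st.2.2)

-- A's second loop: 'for idx in range(len(stack))' with break; returns (stack, check)
def midLoop (stack moved : List Char) (idx : Nat) (check : Int) : List Char × Int :=
  if h : idx < stack.length then
    if stack[idx] = '0' then
      midLoop stack moved (idx + 1) 0
    else
      if check + 1 = 2 then
        (PySem.List.slice stack none (some ((idx : Int) - 1)) ++ moved ++
           PySem.List.slice stack (some ((idx : Int) - 1)) none, check + 1)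
      else
        midLoop stack moved (idx + 1) (check + 1)
  else (stack, check)
termination_by stack.length - idx

-- A's fix-ups after the second loop (check == 0 / check == 1 / otherwise)
def postA (stack moved : List Char) : List Char :=
  let p := midLoop stack moved 0 0
  if p.2 = 0 then p.1 ++ moved
  else if p.2 = 1 then p.1.dropLast ++ moved ++ ['1']
  else p.1

def solution (s : List String) : List String :=
  s.foldl (fun answer case =>
    answer ++ [String.ofList (postA (case.toList.foldl redStepA ([], 0, [])).1
                                    (case.toList.foldl redStepA ([], 0, [])).2.2)]) []

-- ===== PORT B =====
-- B's loop body over the chunks parts[1:] of case.split("0"); state = (t, count, k):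
-- each chunk is preceded by one '0' of the original string (t[:-2] is slice _ none (-2))
def chunkStep (st : List Char × Int × Nat) (c : List Char) : List Char × Int × Nat :=
  let q := if 2 ≤ st.2.1 then
             (PySem.List.slice st.1 none (some (-2)), st.2.1 - 2, st.2.2 + 1)
           else
             (st.1 ++ ['0'], (0 : Int), st.2.2)
  (q.1 ++ c, q.2.1 + (PySem.Chars.count c ['1'] : Int), q.2.2)

-- B's reinsertion scan: 'for p in t.split("0")' with offset j and early break
def chunkScanB : List (List Char) → Nat → Option Nat
  | [], _ => none
  | p :: ps, j => if 2 ≤ p.length then some j else chunkScanB ps (j + p.length + 1)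

def fixCaseB (cs : List Char) : List Char :=
  let parts := PySem.Chars.splitOn cs ['0']
  let h := parts.headD []
  let p := (PySem.List.slice parts (some 1) none).foldl chunkStep
             (h, (PySem.Chars.count h ['1'] : Int), 0)
  let t := p.1
  let moved := (List.replicate p.2.2 (['1', '1', '0'] : List Char)).flatten
  match chunkScanB (PySem.Chars.splitOn t ['0']) 0 with
  | some j => PySem.List.slice t none (some (j : Int)) ++ moved ++
                PySem.List.slice t (some (j : Int)) none
  | none =>
      if t ≠ [] ∧ t.getLast? ≠ some '0' then
        PySem.List.slice t none (some (-1)) ++ moved ++ ['1']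
      else t ++ moved

def solution_alt (s : List String) : List String :=
  s.map (fun case => String.ofList (fixCaseB case.toList))

-- ===== PRECONDITION & SPEC =====
def Spec_solution (s : List String) (out : List String) : Prop := out = solution_alt s
instance (s : List String) (out : List String) : Decidable (Spec_solution s out) := by unfold Spec_solution; infer_instance

-- ===== CLAIM (what is proved, stated in full; the proofs are below) =====
def Claim_equal_solution : Prop := ∀ (s : List String), Dom_solution s → Spec_solution s (solution s)

-- ===== LEMMAS AND PROOFS =====

theorem dropLast_dropLast (l : List Char) : l.dropLast.dropLast = l.take (l.length - 2) := by
  simp [List.dropLast_eq_take, List.take_take]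
  omega

-- proof-side char-level reduction with (count, k) instead of (count, moved)
def redStepC (st : List Char × Int × Nat) (ch : Char) : List Char × Int × Nat :=
  let count := if ch = '1' then st.2.1 + 1 else st.2.1
  if ch = '0' ∧ 2 ≤ count then
    (PySem.List.slice st.1 none (some (-2)), count - 2, st.2.2 + 1)
  else if ch = '0' then
    (st.1 ++ [ch], 0, st.2.2)
  else
    (st.1 ++ [ch], count, st.2.2)

theorem red_lockstep : ∀ (l st : List Char) (c : Int) (k : Nat),
    List.foldl redStepA (st, c, (List.replicate k (['1','1','0'] : List Char)).flatten) l
      = ((List.foldl redStepC (st, c, k) l).1, (List.foldl redStepC (st, c, k) l).2.1,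
         (List.replicate (List.foldl redStepC (st, c, k) l).2.2 (['1','1','0'] : List Char)).flatten) := by
  intro l
  induction l with
  | nil => intro st c k; rfl
  | cons ch l ih =>
    intro st c k
    rw [List.foldl_cons, List.foldl_cons]
    have hstep : redStepA (st, c, (List.replicate k (['1','1','0'] : List Char)).flatten) ch
        = ((redStepC (st, c, k) ch).1, (redStepC (st, c, k) ch).2.1,
           (List.replicate (redStepC (st, c, k) ch).2.2 (['1','1','0'] : List Char)).flatten) := by
      rw [redStepA, redStepC]
      dsimp only
      split_ifs <;>
        first
          | rfl
          | (rw [dropLast_dropLast, PySem.List.slice_to_neg_ofNat st 2 (by norm_num),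
                 List.replicate_succ', List.flatten_append]
             simp)
    rw [hstep]
    have := ih (redStepC (st, c, k) ch).1 (redStepC (st, c, k) ch).2.1 (redStepC (st, c, k) ch).2.2
    simpa using this

-- findPair / fixTail: a characterisation of A's second loop + fix-ups (proof-side only)
def findPair : List Char → Option Nat
  | x :: y :: rest => if x ≠ '0' ∧ y ≠ '0' then some 0 else (findPair (y :: rest)).map (· + 1)
  | _ => none

def fixTail (t m : List Char) : List Char :=
  match findPair t with
  | some j => t.take j ++ m ++ t.drop j
  | none => if t ≠ [] ∧ t.getLast? ≠ some '0' then t.dropLast ++ m ++ ['1'] else t ++ m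

theorem midLoop_shift (c : Char) (stack moved : List Char) :
    ∀ (n idx : Nat) (ch : Int), stack.length - idx ≤ n → (ch = 0 ∨ (ch = 1 ∧ 1 ≤ idx)) →
    midLoop (c :: stack) moved (idx + 1) ch =
      (c :: (midLoop stack moved idx ch).1, (midLoop stack moved idx ch).2) := by
  intro n
  induction n with
  | zero =>
    intro idx ch hn _
    have h1 : ¬ idx < stack.length := by omega
    have h2 : ¬ idx + 1 < (c :: stack).length := by simp; omega
    rw [midLoop.eq_def (c :: stack) moved (idx + 1) ch, midLoop.eq_def stack moved idx ch,
        dif_neg h1, dif_neg h2]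
  | succ n ih =>
    intro idx ch hn hch
    by_cases h1 : idx < stack.length
    · have h2 : idx + 1 < (c :: stack).length := by simp; omega
      rw [midLoop.eq_def (c :: stack) moved (idx + 1) ch, midLoop.eq_def stack moved idx ch,
          dif_pos h1, dif_pos h2]
      have hget : (c :: stack)[idx + 1]'(h2) = stack[idx]'(h1) := by simp
      rw [hget]
      by_cases hz : stack[idx]'(h1) = '0'
      · rw [if_pos hz, if_pos hz]
        exact ih (idx + 1) 0 (by omega) (Or.inl rfl)
      · rw [if_neg hz, if_neg hz]
        rcases hch with rfl | ⟨rfl, hidx⟩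
        · rw [if_neg (by norm_num), if_neg (by norm_num)]
          exact ih (idx + 1) 1 (by omega) (Or.inr ⟨rfl, by omega⟩)
        · rw [if_pos (by norm_num), if_pos (by norm_num)]
          have e2 : ((idx : Int)) - 1 = (((idx - 1 : Nat)) : Int) := by omega
          have htake : PySem.List.slice (c :: stack) none (some (((idx + 1 : Nat) : Int) - 1)) =
              c :: PySem.List.slice stack none (some ((idx : Int) - 1)) := by
            rw [show (((idx + 1 : Nat) : Int) - 1) = ((idx : Nat) : Int) by omega,
                e2, PySem.List.slice_to_natCast, PySem.List.slice_to_natCast]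
            rw [show idx = (idx - 1) + 1 by omega]
            simp [List.take_succ_cons]
          have hdrop : PySem.List.slice (c :: stack) (some (((idx + 1 : Nat) : Int) - 1)) none =
              PySem.List.slice stack (some ((idx : Int) - 1)) none := by
            rw [show (((idx + 1 : Nat) : Int) - 1) = ((idx : Nat) : Int) by omega,
                e2, PySem.List.slice_from_natCast, PySem.List.slice_from_natCast]
            rw [show idx = (idx - 1) + 1 by omega]
            simp [List.drop_succ_cons]
          rw [htake, hdrop]
          simp
    · have h2 : ¬ idx + 1 < (c :: stack).length := by simp; omega
      rw [midLoop.eq_def (c :: stack) moved (idx + 1) ch, midLoop.eq_def stack moved idx ch,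
          dif_neg h1, dif_neg h2]

theorem midLoop_findPair (m : List Char) : ∀ (n : Nat) (t : List Char), t.length ≤ n →
    midLoop t m 0 0 = (match findPair t with
      | some j => (t.take j ++ m ++ t.drop j, 2)
      | none => (t, if t ≠ [] ∧ t.getLast? ≠ some '0' then 1 else 0)) := by
  intro n
  induction n with
  | zero =>
    intro t hlen
    have : t = [] := List.length_eq_zero_iff.mp (by omega)
    subst this
    rw [midLoop.eq_def, dif_neg (by simp)]
    simp [findPair]
  | succ n ih =>
    intro t hlen
    match t with
    | [] =>
      rw [midLoop.eq_def, dif_neg (by simp)]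
      simp [findPair]
    | [c] =>
      by_cases hc : c = '0'
      · subst hc
        rw [midLoop.eq_def, dif_pos (by simp)]
        simp only [List.getElem_cons_zero]
        rw [if_pos trivial]
        rw [midLoop.eq_def, dif_neg (by simp)]
        simp [findPair]
      · rw [midLoop.eq_def, dif_pos (by simp)]
        simp only [List.getElem_cons_zero]
        rw [if_neg hc, if_neg (by norm_num)]
        rw [midLoop.eq_def, dif_neg (by simp)]
        simp [findPair, hc]
    | x :: y :: rest =>
      have hlen' : (y :: rest).length ≤ n := by simp at hlen ⊢; omega
      by_cases hx : x = '0'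
      · subst hx
        rw [midLoop.eq_def, dif_pos (by simp)]
        simp only [List.getElem_cons_zero]
        rw [if_pos trivial]
        rw [midLoop_shift '0' (y :: rest) m (y :: rest).length 0 0 (by omega) (Or.inl rfl)]
        rw [ih (y :: rest) hlen']
        cases hfp : findPair (y :: rest) with
        | some j =>
          have : findPair ('0' :: y :: rest) = some (j + 1) := by
            rw [findPair, if_neg (by simp), hfp]; rfl
          rw [this]
          simp [List.take_succ_cons, List.drop_succ_cons]
        | none =>
          have : findPair ('0' :: y :: rest) = none := by
            rw [findPair, if_neg (by simp), hfp]; rfl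
          rw [this]
          simp [List.getLast?_cons_cons]
      · by_cases hy : y = '0'
        · subst hy
          rw [midLoop.eq_def, dif_pos (by simp)]
          simp only [List.getElem_cons_zero]
          rw [if_neg hx, if_neg (by norm_num)]
          rw [midLoop.eq_def, dif_pos (by simp)]
          simp only [List.getElem_cons_succ, List.getElem_cons_zero]
          rw [if_pos trivial]
          rw [show (1 : Nat) + 1 = 1 + 1 from rfl]
          rw [midLoop_shift x ('0' :: rest) m ('0' :: rest).length 1 0 (by omega) (Or.inl rfl)]
          rw [midLoop_shift '0' rest m rest.length 0 0 (by omega) (Or.inl rfl)]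
          rw [ih rest (by simp at hlen; omega)]
          have hfp0 : findPair (x :: '0' :: rest) = (findPair ('0' :: rest)).map (· + 1) := by
            rw [findPair, if_neg (by simp)]
          cases hfpr : findPair rest with
          | some j =>
            have h1 : findPair ('0' :: rest) = some (j + 1) := by
              cases rest with
              | nil => simp [findPair] at hfpr
              | cons z zs =>
                rw [findPair, if_neg (by simp), hfpr]; rfl
            rw [hfp0, h1]
            simp [List.take_succ_cons, List.drop_succ_cons]
          | none =>
            have h1 : findPair ('0' :: rest) = none := by
              cases rest with
              | nil => simp [findPair]
              | cons z zs =>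
                rw [findPair, if_neg (by simp), hfpr]; rfl
            rw [hfp0, h1]
            simp only [Option.map_none]
            cases rest with
            | nil => simp
            | cons z zs => simp [List.getLast?_cons_cons]
        · rw [midLoop.eq_def, dif_pos (by simp)]
          simp only [List.getElem_cons_zero]
          rw [if_neg hx, if_neg (by norm_num)]
          rw [midLoop.eq_def, dif_pos (by simp)]
          simp only [List.getElem_cons_succ, List.getElem_cons_zero]
          rw [if_neg hy, if_pos (by norm_num)]
          have hfp : findPair (x :: y :: rest) = some 0 := by
            rw [findPair, if_pos ⟨hx, hy⟩]
          rw [hfp]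
          rw [show ((1 : Nat) : Int) - 1 = ((0 : Nat) : Int) by norm_num]
          rw [PySem.List.slice_to_natCast, PySem.List.slice_from_natCast]
          norm_num

theorem postA_fixTail (t m : List Char) : postA t m = fixTail t m := by
  rw [postA, midLoop_findPair m t.length t le_rfl, fixTail]
  cases hfp : findPair t with
  | some j => simp
  | none =>
    by_cases hc : t ≠ [] ∧ t.getLast? ≠ some '0'
    · rw [if_pos hc, if_pos hc]
      norm_num
    · rw [if_neg hc, if_neg hc]
      norm_num

-- structural form of case.split("0") (single-character separator)
def splitZ : List Char → List (List Char)
  | [] => [[]]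
  | c :: cs => if c = '0' then [] :: splitZ cs
               else (c :: (splitZ cs).headD []) :: (splitZ cs).tail

theorem splitZ_ne_nil (l : List Char) : splitZ l ≠ [] := by
  cases l with
  | nil => simp [splitZ]
  | cons c cs => rw [splitZ]; split_ifs <;> simp

theorem splitZ_eta (l : List Char) : (splitZ l).head?.getD [] :: (splitZ l).tail = splitZ l := by
  cases h : splitZ l with
  | nil => exact absurd h (splitZ_ne_nil l)
  | cons a as => simp

theorem splitOn_go_eq :
    ∀ (fuel : Nat) (l cur : List Char) (acc : List (List Char)), l.length < fuel →
    PySem.Chars.splitOn.go ['0'] fuel l cur acc =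
      acc.reverse ++ (cur.reverse ++ (splitZ l).headD []) :: (splitZ l).tail := by
  intro fuel
  induction fuel with
  | zero => intro l cur acc h; omega
  | succ n ih =>
    intro l cur acc h
    cases l with
    | nil =>
      rw [PySem.Chars.splitOn.go.eq_def]
      simp [splitZ]
    | cons c rest =>
      rw [PySem.Chars.splitOn.go.eq_def]
      by_cases hc : c = '0'
      · subst hc
        have hpre : (['0'] : List Char).isPrefixOf ('0' :: rest) = true := by
          simp [List.isPrefixOf]
        simp only [hpre, if_pos, List.length_cons, List.length_nil, List.drop_succ_cons,
          List.drop_zero]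
        rw [ih rest [] (cur.reverse :: acc) (by simp at h ⊢; omega)]
        rw [splitZ, if_pos rfl]
        simp [splitZ_eta]
      · have hpre : (['0'] : List Char).isPrefixOf (c :: rest) = false := by
          simp [List.isPrefixOf]
          exact fun hh => absurd hh.symm hc
        simp only [hpre, Bool.false_eq_true, if_false]
        rw [ih rest (c :: cur) acc (by simp at h ⊢; omega)]
        rw [splitZ, if_neg hc]
        simp

theorem splitOn_eq_splitZ (l : List Char) : PySem.Chars.splitOn l ['0'] = splitZ l := by
  rw [PySem.Chars.splitOn]
  rw [splitOn_go_eq (l.length + 1) l [] [] (by omega)]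
  simp [splitZ_eta]

theorem count_go_eq : ∀ (fuel : Nat) (l : List Char) (acc : Nat), l.length ≤ fuel →
    PySem.Chars.count.go ['1'] fuel l acc = acc + l.count '1' := by
  intro fuel
  induction fuel with
  | zero =>
    intro l acc h
    have : l = [] := List.length_eq_zero_iff.mp (by omega)
    subst this
    rw [PySem.Chars.count.go.eq_def]
    simp
  | succ n ih =>
    intro l acc h
    cases l with
    | nil => rw [PySem.Chars.count.go.eq_def]; simp
    | cons c rest =>
      rw [PySem.Chars.count.go.eq_def]
      by_cases hc : c = '1'
      · subst hc
        have hpre : (['1'] : List Char).isPrefixOf ('1' :: rest) = true := by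
          simp [List.isPrefixOf]
        simp only [hpre, if_pos, List.length_cons, List.length_nil, List.drop_succ_cons,
          List.drop_zero]
        rw [ih rest (acc + 1) (by simp at h ⊢; omega)]
        simp only [List.count_cons_self]
        omega
      · have hpre : (['1'] : List Char).isPrefixOf (c :: rest) = false := by
          simp [List.isPrefixOf]
          exact fun hh => absurd hh.symm hc
        simp only [hpre, Bool.false_eq_true, if_false]
        rw [ih rest acc (by simp at h ⊢; omega)]
        simp [hc]

theorem count_one_eq (l : List Char) : PySem.Chars.count l ['1'] = l.count '1' := by
  rw [PySem.Chars.count, if_neg (by simp)]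
  rw [count_go_eq l.length l 0 le_rfl]
  simp

-- B's chunk fold over split("0") computes exactly the char-level reduction
theorem chunk_fold_eq : ∀ (cs t : List Char) (cnt : Int) (k : Nat),
    List.foldl chunkStep
      (t ++ (splitZ cs).headD [], cnt + ((PySem.Chars.count ((splitZ cs).headD []) ['1'] : Nat) : Int), k)
      (splitZ cs).tail
    = List.foldl redStepC (t, cnt, k) cs := by
  intro cs
  induction cs with
  | nil =>
    intro t cnt k
    simp [splitZ, count_one_eq]
  | cons c cs ih =>
    intro t cnt k
    by_cases hc : c = '0'
    · subst hc
      obtain ⟨hd, tl, hsp⟩ : ∃ hd tl, splitZ cs = hd :: tl := by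
        cases h : splitZ cs with
        | nil => exact absurd h (splitZ_ne_nil cs)
        | cons a as => exact ⟨a, as, rfl⟩
      have hhd : (splitZ cs).headD [] = hd := by rw [hsp]; rfl
      have htl : (splitZ cs).tail = tl := by rw [hsp]; rfl
      rw [splitZ, if_pos rfl]
      simp only [List.headD_cons, List.tail_cons]
      rw [hsp, List.foldl_cons, List.foldl_cons]
      have hstep : chunkStep (t ++ [], cnt + ((PySem.Chars.count ([] : List Char) ['1'] : Nat) : Int), k) hd
          = ((redStepC (t, cnt, k) '0').1 ++ hd,
             (redStepC (t, cnt, k) '0').2.1 + ((PySem.Chars.count hd ['1'] : Nat) : Int),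
             (redStepC (t, cnt, k) '0').2.2) := by
        by_cases h2 : 2 ≤ cnt <;> simp [chunkStep, redStepC, h2, count_one_eq]
      rw [hstep]
      have := ih (redStepC (t, cnt, k) '0').1 (redStepC (t, cnt, k) '0').2.1
                 (redStepC (t, cnt, k) '0').2.2
      rw [hhd, htl] at this
      exact this
    · rw [splitZ, if_neg hc]
      simp only [List.headD_cons, List.tail_cons]
      have hcc : ((PySem.Chars.count (c :: (splitZ cs).headD []) ['1'] : Nat) : Int)
          = (if c = '1' then 1 else 0) + ((PySem.Chars.count ((splitZ cs).headD []) ['1'] : Nat) : Int) := by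
        rw [count_one_eq, count_one_eq]
        by_cases h1 : c = '1'
        · simp [h1]
          omega
        · simp [h1]
      have hred : redStepC (t, cnt, k) c = (t ++ [c], cnt + (if c = '1' then 1 else 0), k) := by
        rw [redStepC]
        dsimp only
        rw [if_neg (fun hh => hc hh.1), if_neg hc]
        by_cases h1 : c = '1' <;> simp [h1]
      rw [List.foldl_cons, hred]
      rw [← ih (t ++ [c]) (cnt + (if c = '1' then 1 else 0)) k, hcc]
      congr 2
      · simp
      · rw [add_assoc]

-- B's reinsertion scan over the chunk list finds exactly A's first adjacent non-'0' pair
theorem chunkScan_eq : ∀ (t : List Char) (j : Nat),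
    chunkScanB (splitZ t) j = (findPair t).map (· + j) := by
  intro t
  induction t with
  | nil => intro j; simp [splitZ, chunkScanB, findPair]
  | cons x t' ih =>
    intro j
    by_cases hx : x = '0'
    · subst hx
      rw [splitZ, if_pos rfl, chunkScanB]
      simp only [List.length_nil]
      rw [if_neg (by omega)]
      have h1 : chunkScanB (splitZ t') (j + 0 + 1) = (findPair t').map (· + (j + 1)) := by
        rw [show j + 0 + 1 = j + 1 by omega]; exact ih (j + 1)
      rw [h1]
      cases t' with
      | nil => simp [findPair]
      | cons y t'' =>
        rw [show findPair ('0' :: y :: t'') = (findPair (y :: t'')).map (· + 1) by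
              rw [findPair, if_neg (by simp)]]
        cases findPair (y :: t'') with
        | none => simp
        | some a => simp; omega
    · cases t' with
      | nil =>
        rw [splitZ]
        rw [if_neg hx]
        simp [splitZ, chunkScanB, findPair]
      | cons y t'' =>
        by_cases hy : y = '0'
        · subst hy
          rw [splitZ, if_neg hx, splitZ, if_pos rfl]
          simp only [List.headD_cons, List.tail_cons]
          rw [chunkScanB]
          simp only [List.length_cons, List.length_nil]
          rw [if_neg (by omega)]
          have h0 : chunkScanB (splitZ ('0' :: t'')) (j + 1) = chunkScanB (splitZ t'') (j + (0 + 1) + 1) := by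
            rw [splitZ, if_pos rfl, chunkScanB]
            simp only [List.length_nil]
            rw [if_neg (by omega)]
          rw [← h0, ih (j + 1)]
          rw [show findPair (x :: '0' :: t'') = (findPair ('0' :: t'')).map (· + 1) by
                rw [findPair, if_neg (by simp)]]
          cases findPair ('0' :: t'') with
          | none => simp
          | some a => simp; omega
        · rw [splitZ, if_neg hx]
          rw [show splitZ (y :: t'') = (y :: (splitZ t'').headD []) :: (splitZ t'').tail by
                rw [splitZ, if_neg hy]]
          simp only [List.headD_cons, List.tail_cons]
          rw [chunkScanB]
          simp only [List.length_cons]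
          rw [if_pos (by omega)]
          rw [findPair, if_pos ⟨hx, hy⟩]
          simp

theorem fixCaseB_eq (cs : List Char) :
    fixCaseB cs = fixTail (List.foldl redStepC ([], 0, 0) cs).1
      ((List.replicate (List.foldl redStepC ([], 0, 0) cs).2.2 (['1','1','0'] : List Char)).flatten) := by
  simp only [fixCaseB, splitOn_eq_splitZ]
  rw [PySem.List.slice_from_one]
  have hfold : List.foldl chunkStep
      ((splitZ cs).headD [], ((PySem.Chars.count ((splitZ cs).headD []) ['1'] : Nat) : Int), 0)
      (splitZ cs).tail = List.foldl redStepC ([], 0, 0) cs := by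
    have := chunk_fold_eq cs [] 0 0
    simpa using this
  rw [hfold]
  rw [fixTail]
  rw [chunkScan_eq (List.foldl redStepC ([], 0, 0) cs).1 0]
  cases hfp : findPair (List.foldl redStepC ([], 0, 0) cs).1 with
  | some j =>
      simp only [Option.map_some]
      simp [PySem.List.slice_to_natCast, PySem.List.slice_from_natCast]
  | none =>
      simp only [Option.map_none]
      by_cases hcd : (List.foldl redStepC ([], 0, 0) cs).1 ≠ [] ∧
          (List.foldl redStepC ([], 0, 0) cs).1.getLast? ≠ some '0'
      · rw [if_pos hcd, if_pos hcd, PySem.List.slice_to_neg_one]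
      · rw [if_neg hcd, if_neg hcd]

theorem solution_eq (s : List String) : solution s = solution_alt s := by
  rw [solution, solution_alt,
      PySem.List.foldl_append_singleton_eq_map
        (fun case : String => String.ofList (postA (case.toList.foldl redStepA ([], 0, [])).1
                                    (case.toList.foldl redStepA ([], 0, [])).2.2)) s []]
  rw [List.nil_append]
  apply List.map_congr_left
  intro case _
  congr 1
  have hinit : (([], 0, []) : List Char × Int × List Char)
      = (([] : List Char), (0 : Int), (List.replicate 0 (['1','1','0'] : List Char)).flatten) := rfl
  rw [hinit, red_lockstep case.toList [] 0 0]
  rw [postA_fixTail, fixCaseB_eq]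

-- ===== VERDICT (by name: the statement is the Claim_ definition above) =====
theorem solution_spec : Claim_equal_solution := by
  intro s _hdom
  exact solution_eq s
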